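-- pv_equiv track=rewrite | github.com/ilhomadmin/konkurs-bot | bot/handlers/vip.py | get_vip_info
-- ===== SOURCE A (Python) =====
-- VIP_LEVELS = [
--     {"name": "🥉 Bronze", "min": 500_000, "discount": 3},
--     {"name": "🥈 Silver", "min": 2_000_000, "discount": 5},
--     {"name": "🥇 Gold", "min": 5_000_000, "discount": 8},
--     {"name": "💎 Platinum", "min": 10_000_000, "discount": 12},
-- ]
--
-- def get_vip_info(total: int):
--     level_name = None
--     discount = 0
--     next_threshold = VIP_LEVELS[0]["min"]
--
--     for lvl in VIP_LEVELS:
--         if total >= lvl["min"]: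
--             level_name = lvl["name"]
--             discount = lvl["discount"]
--         else:
--             next_threshold = lvl["min"]
--             break
--     else:
--         next_threshold = None
--
--     if next_threshold is None:
--         remaining = 0
--         bar_pct = 100
--     else:
--         remaining = max(0, next_threshold - total)
--         prev = 0
--         for lvl in VIP_LEVELS:
--             if total < lvl["min"]:
--                 span = lvl["min"] - prev
--                 prog = total - prev
--                 bar_pct = min(100, int(prog * 100 / span)) if span > 0 else 0
--                 break
--             prev = lvl["min"]
--         else:
--             bar_pct = 100
--
--     filled = bar_pct // 10
--     bar = "🟩" * filled + "⬜" * (10 - filled) + f" {bar_pct}%"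
--     return level_name, discount, remaining, bar
-- ===== SOURCE B (Python) =====
-- VIP_LEVELS = [
--     {"name": "🥉 Bronze", "min": 500_000, "discount": 3},
--     {"name": "🥈 Silver", "min": 2_000_000, "discount": 5},
--     {"name": "🥇 Gold", "min": 5_000_000, "discount": 8},
--     {"name": "💎 Platinum", "min": 10_000_000, "discount": 12},
-- ]
--
-- def get_vip_info(total: int):
--     # one count of achieved tiers replaces A's two break/else loops
--     idx = sum(1 for lvl in VIP_LEVELS if lvl["min"] <= total)
--     if idx == 0:
--         level_name, discount, prev = None, 0, 0
--     else:
--         lvl = VIP_LEVELS[idx - 1]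
--         level_name, discount, prev = lvl["name"], lvl["discount"], lvl["min"]
--     if idx == len(VIP_LEVELS):
--         remaining, bar_pct = 0, 100
--     else:
--         nxt = VIP_LEVELS[idx]["min"]
--         remaining = max(0, nxt - total)
--         bar_pct = min(100, int((total - prev) * 100 / (nxt - prev)))
--     filled = bar_pct // 10
--     return level_name, discount, remaining, "🟩" * filled + "⬜" * (10 - filled) + f" {bar_pct}%"
-- ===== Notes on version B (the rewrite author's own statement) =====
-- stated objective: idiomatic
-- what changed: Replaces A's two sequential for-loops with break/else (one accumulating level state, one tracking a prev threshold) by a single count of achieved tiers (idx) followed by direct indexing into VIP_LEVELS for level, previous and next thresholds.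
import Mathlib
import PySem

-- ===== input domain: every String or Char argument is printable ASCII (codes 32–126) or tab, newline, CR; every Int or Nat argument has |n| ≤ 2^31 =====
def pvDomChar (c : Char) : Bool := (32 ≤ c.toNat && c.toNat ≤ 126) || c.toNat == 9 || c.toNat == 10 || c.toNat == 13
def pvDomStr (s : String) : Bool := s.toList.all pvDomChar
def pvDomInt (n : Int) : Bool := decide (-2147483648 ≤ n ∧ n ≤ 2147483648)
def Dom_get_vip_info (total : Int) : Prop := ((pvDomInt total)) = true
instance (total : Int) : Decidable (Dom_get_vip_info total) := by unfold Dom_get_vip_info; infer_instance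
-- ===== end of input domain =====

-- B replaces A's two break/else loops by one count of achieved tiers plus direct indexing (idiomatic).
-- Python's int(prog * 100 / span) (float divide, truncate) is ported as Int.tdiv (truncation toward zero):
-- on |total| ≤ 2^31 with these spans the float quotient is never within half an ulp of an integer,
-- so the truncations coincide (checked numerically; the differential tester exercises it).

-- the module constant VIP_LEVELS: (name, min, discount)
def pvVIP_LEVELS : List (String × Int × Int) :=
  [("🥉 Bronze", 500000, 3), ("🥈 Silver", 2000000, 5),
   ("🥇 Gold", 5000000, 8), ("💎 Platinum", 10000000, 12)]

-- ===== PORT A =====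
-- A's first loop: for lvl in VIP_LEVELS: ... break / else  (state: level_name, discount; returns next_threshold)
def pvFindLevelA (total : Int) : List (String × Int × Int) → Option String → Int → Option String × Int × Option Int
  | [], name, disc => (name, disc, none)                    -- for/else: next_threshold = None
  | (n, m, d) :: rest, name, disc =>
    if total ≥ m then pvFindLevelA total rest (some n) d
    else (name, disc, some m)                               -- break: next_threshold = lvl["min"]

-- A's second loop: prev accumulator, break on total < lvl["min"], else bar_pct = 100
def pvFindBarA (total : Int) : List (String × Int × Int) → Int → Int
  | [], _ => 100
  | (_, m, _) :: rest, prev =>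
    if total < m then
      (if m - prev > 0 then min 100 (Int.tdiv ((total - prev) * 100) (m - prev)) else 0)
    else pvFindBarA total rest m

def get_vip_info (total : Int) : Option String × Int × Int × String :=
  let r := pvFindLevelA total pvVIP_LEVELS none 0
  let p :=
    match r.2.2 with
    | none => ((0 : Int), (100 : Int))                       -- remaining = 0, bar_pct = 100
    | some nxt => (max 0 (nxt - total), pvFindBarA total pvVIP_LEVELS 0)
  let filled := PySem.Int.floordiv p.2 10
  (r.1, r.2.1, p.1,
    String.ofList (PySem.List.pyRepeat "🟩".toList filled ++
      PySem.List.pyRepeat "⬜".toList (10 - filled) ++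
      " ".toList ++ PySem.Int.toChars p.2 ++ "%".toList))

-- ===== PORT B =====
def get_vip_info_alt (total : Int) : Option String × Int × Int × String :=
  let idx := (pvVIP_LEVELS.filter (fun l => l.2.1 ≤ total)).length
  let t :=  -- (level_name, discount, prev)
    if idx = 0 then ((none : Option String), (0 : Int), (0 : Int))
    else let l := pvVIP_LEVELS.getD (idx - 1) ("", 0, 0); (some l.1, l.2.2, l.2.1)
  let q :=  -- (remaining, bar_pct)
    if idx = pvVIP_LEVELS.length then ((0 : Int), (100 : Int))
    else
      let nxt := (pvVIP_LEVELS.getD idx ("", 0, 0)).2.1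
      (max 0 (nxt - total), min 100 (Int.tdiv ((total - t.2.2) * 100) (nxt - t.2.2)))
  let filled := PySem.Int.floordiv q.2 10
  (t.1, t.2.1, q.1,
    String.ofList (PySem.List.pyRepeat "🟩".toList filled ++
      PySem.List.pyRepeat "⬜".toList (10 - filled) ++
      " ".toList ++ PySem.Int.toChars q.2 ++ "%".toList))

-- ===== PRECONDITION & SPEC =====
def Spec_get_vip_info (total : Int) (out : Option String × Int × Int × String) : Prop := out = get_vip_info_alt total
instance (total : Int) (out : Option String × Int × Int × String) : Decidable (Spec_get_vip_info total out) := by unfold Spec_get_vip_info; infer_instance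

-- ===== CLAIM (what is proved, stated in full; the proofs are below) =====
def Claim_equal_get_vip_info : Prop := ∀ (total : Int), Dom_get_vip_info total → Spec_get_vip_info total (get_vip_info total)

-- ===== LEMMAS AND PROOFS =====

-- ===== VERDICT (by name: the statement is the Claim_ definition above) =====
theorem get_vip_info_spec : Claim_equal_get_vip_info := by
  intro total _
  unfold Spec_get_vip_info get_vip_info get_vip_info_alt
  rcases lt_or_ge total 500000 with h | h
  · simp [pvVIP_LEVELS, pvFindLevelA, pvFindBarA,
      show ¬ (500000:Int) ≤ total by omega,
      show total < 500000 by omega,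
      show ¬ total ≥ 500000 by omega,
      show ¬ (2000000:Int) ≤ total by omega,
      show total < 2000000 by omega,
      show ¬ total ≥ 2000000 by omega,
      show ¬ (5000000:Int) ≤ total by omega,
      show total < 5000000 by omega,
      show ¬ total ≥ 5000000 by omega,
      show ¬ (10000000:Int) ≤ total by omega,
      show total < 10000000 by omega,
      show ¬ total ≥ 10000000 by omega]
  rcases lt_or_ge total 2000000 with h2 | h2
  · simp [pvVIP_LEVELS, pvFindLevelA, pvFindBarA,
      show (500000:Int) ≤ total by omega,
      show ¬ total < 500000 by omega,
      show total ≥ 500000 by omega,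
      show ¬ (2000000:Int) ≤ total by omega,
      show total < 2000000 by omega,
      show ¬ total ≥ 2000000 by omega,
      show ¬ (5000000:Int) ≤ total by omega,
      show total < 5000000 by omega,
      show ¬ total ≥ 5000000 by omega,
      show ¬ (10000000:Int) ≤ total by omega,
      show total < 10000000 by omega,
      show ¬ total ≥ 10000000 by omega]
  rcases lt_or_ge total 5000000 with h3 | h3
  · simp [pvVIP_LEVELS, pvFindLevelA, pvFindBarA,
      show (500000:Int) ≤ total by omega,
      show ¬ total < 500000 by omega,
      show total ≥ 500000 by omega,
      show (2000000:Int) ≤ total by omega,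
      show ¬ total < 2000000 by omega,
      show total ≥ 2000000 by omega,
      show ¬ (5000000:Int) ≤ total by omega,
      show total < 5000000 by omega,
      show ¬ total ≥ 5000000 by omega,
      show ¬ (10000000:Int) ≤ total by omega,
      show total < 10000000 by omega,
      show ¬ total ≥ 10000000 by omega]
  rcases lt_or_ge total 10000000 with h4 | h4
  · simp [pvVIP_LEVELS, pvFindLevelA, pvFindBarA,
      show (500000:Int) ≤ total by omega,
      show ¬ total < 500000 by omega,
      show total ≥ 500000 by omega,
      show (2000000:Int) ≤ total by omega,
      show ¬ total < 2000000 by omega,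
      show total ≥ 2000000 by omega,
      show (5000000:Int) ≤ total by omega,
      show ¬ total < 5000000 by omega,
      show total ≥ 5000000 by omega,
      show ¬ (10000000:Int) ≤ total by omega,
      show total < 10000000 by omega,
      show ¬ total ≥ 10000000 by omega]
  · simp [pvVIP_LEVELS, pvFindLevelA, pvFindBarA,
      show (500000:Int) ≤ total by omega,
      show ¬ total < 500000 by omega,
      show total ≥ 500000 by omega,
      show (2000000:Int) ≤ total by omega,
      show ¬ total < 2000000 by omega,
      show total ≥ 2000000 by omega,
      show (5000000:Int) ≤ total by omega,
      show ¬ total < 5000000 by omega,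
      show total ≥ 5000000 by omega,
      show (10000000:Int) ≤ total by omega,
      show ¬ total < 10000000 by omega,
      show total ≥ 10000000 by omega]
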